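-- pv_equiv track=rewrite | github.com/tylerneylon/water | water.py | merge_same_ranges
-- ===== SOURCE A (Python) =====
-- def merge_same_ranges(ranges, code_strs):
--   out_ranges = []
--   out_strs = []
--   for i in range(len(code_strs)):
--     if out_ranges and out_ranges[-1] == ranges[i]:
--       out_strs[-1] += ('\n' + code_strs[i])
--     else:
--       out_ranges.append(ranges[i])
--       out_strs.append(code_strs[i])
--   return out_ranges, out_strs
-- ===== SOURCE B (Python) =====
-- def merge_same_ranges(ranges, code_strs):
--     pairs = list(zip(ranges, code_strs))
--     out_ranges = []
--     out_strs = []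
--     i = 0
--     n = len(pairs)
--     while i < n:
--         r = pairs[i][0]
--         j = i + 1
--         while j < n and pairs[j][0] == r:
--             j += 1
--         out_ranges.append(r)
--         out_strs.append('\n'.join(s for _, s in pairs[i:j]))
--         i = j
--     return out_ranges, out_strs
-- ===== Notes on version B (the rewrite author's own statement) =====
-- stated objective: alternative
-- what changed: B zips ranges with code_strs and scans run boundaries of equal ranges (outer loop per run, inner scan to the run's end, one '\n'.join per run), instead of A's per-index loop that mutates the last element of the output with incremental string concatenation.
import Mathlib
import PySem

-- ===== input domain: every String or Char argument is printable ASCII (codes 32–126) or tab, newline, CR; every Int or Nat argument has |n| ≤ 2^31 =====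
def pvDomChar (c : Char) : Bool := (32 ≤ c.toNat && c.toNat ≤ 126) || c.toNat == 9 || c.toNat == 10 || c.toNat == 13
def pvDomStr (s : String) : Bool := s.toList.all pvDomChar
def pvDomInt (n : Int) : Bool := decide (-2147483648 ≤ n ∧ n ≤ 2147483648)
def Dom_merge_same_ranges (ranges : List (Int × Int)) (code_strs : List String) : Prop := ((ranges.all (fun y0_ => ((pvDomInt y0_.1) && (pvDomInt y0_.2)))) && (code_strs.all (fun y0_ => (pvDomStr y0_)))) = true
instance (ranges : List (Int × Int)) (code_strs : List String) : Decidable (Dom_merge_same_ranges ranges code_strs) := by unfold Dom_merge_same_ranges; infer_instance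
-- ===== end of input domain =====

-- B merges runs of equal consecutive ranges by zipping and scanning run boundaries with one join per run,
-- instead of A's per-index loop mutating the last output string; same results wherever A returns (Pre_).


-- ===== PORT A =====
-- 'out_strs[-1] += v' : replace the last element of the list (guarded nonempty in A)
def pvSetLast : List String → String → List String
  | [], _ => []
  | [_], v => [v]
  | x :: y :: xs, v => x :: pvSetLast (y :: xs) v

def merge_same_ranges (ranges : List (Int × Int)) (code_strs : List String) : (List (Int × Int)) × List String :=
  (PySem.List.pyRange 0 (code_strs.length : Int)).foldl
    (fun (st : List (Int × Int) × List String) i =>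
      if st.1 ≠ [] ∧ st.1.getLast? = some (PySem.List.pyGetD ranges i (0, 0)) then
        (st.1, pvSetLast st.2 (st.2.getLast?.getD "" ++ "\n" ++ PySem.List.pyGetD code_strs i ""))
      else
        (st.1 ++ [PySem.List.pyGetD ranges i (0, 0)], st.2 ++ [PySem.List.pyGetD code_strs i ""]))
    ([], [])

-- ===== PORT B =====
-- Source B's outer while over runs: the inner while is the takeWhile/dropWhile scan of the current run;
-- the Nat fuel (initialised to the list length, which the outer index scan never exceeds) only makes
-- the jump to the run's end structurally recursive — the computation is Source B's.
def pvRunsGo : Nat → List ((Int × Int) × String) → (List (Int × Int)) × List String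
  | _, [] => ([], [])
  | 0, _ :: _ => ([], [])
  | fuel + 1, (r, s) :: rest =>
    let run := rest.takeWhile (fun p => p.1 == r)
    let rest' := rest.dropWhile (fun p => p.1 == r)
    let out := pvRunsGo fuel rest'
    (r :: out.1, PySem.Str.join "\n" (s :: run.map Prod.snd) :: out.2)

def merge_same_ranges_alt (ranges : List (Int × Int)) (code_strs : List String) : (List (Int × Int)) × List String :=
  pvRunsGo (ranges.zip code_strs).length (ranges.zip code_strs)

-- ===== PRECONDITION & SPEC =====
-- Pre_ excludes exactly the inputs with more code_strs than ranges, on which A raises IndexError at ranges[i].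
def Pre_merge_same_ranges (ranges : List (Int × Int)) (code_strs : List String) : Prop :=
  code_strs.length ≤ ranges.length
instance (ranges : List (Int × Int)) (code_strs : List String) : Decidable (Pre_merge_same_ranges ranges code_strs) := by unfold Pre_merge_same_ranges; infer_instance

def pvWitness_merge_same_ranges : (List (Int × Int)) × List String := ([((0 : Int), (1 : Int)), (0, 1)], ["a", "b"])

def Spec_merge_same_ranges (ranges : List (Int × Int)) (code_strs : List String) (out : (List (Int × Int)) × List String) : Prop := out = merge_same_ranges_alt ranges code_strs
instance (ranges : List (Int × Int)) (code_strs : List String) (out : (List (Int × Int)) × List String) : Decidable (Spec_merge_same_ranges ranges code_strs out) := by unfold Spec_merge_same_ranges; infer_instance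

-- ===== CLAIM (what is proved, stated in full; the proofs are below) =====
def Claim_equal_merge_same_ranges : Prop := ∀ (ranges : List (Int × Int)) (code_strs : List String), Dom_merge_same_ranges ranges code_strs → Pre_merge_same_ranges ranges code_strs → Spec_merge_same_ranges ranges code_strs (merge_same_ranges ranges code_strs)

-- ===== LEMMAS AND PROOFS =====

-- A's loop body, expressed on a (range, code_str) pair
def pvStep (st : List (Int × Int) × List String) (p : (Int × Int) × String) : List (Int × Int) × List String :=
  if st.1 ≠ [] ∧ st.1.getLast? = some p.1 then
    (st.1, pvSetLast st.2 (st.2.getLast?.getD "" ++ "\n" ++ p.2))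
  else
    (st.1 ++ [p.1], st.2 ++ [p.2])

theorem pvSetLast_append (as : List String) (a v : String) :
    pvSetLast (as ++ [a]) v = as ++ [v] := by
  induction as with
  | nil => rfl
  | cons x t ih =>
    cases t with
    | nil => rfl
    | cons y t' => simpa [pvSetLast] using ih

theorem pvJoin_singleton (a : String) : PySem.Str.join "\n" [a] = a := by
  rw [← String.toList_inj, PySem.Str.toList_join]
  simp [PySem.Chars.join_singleton]

theorem pvJoin_shift (a s : String) (l : List String) :
    PySem.Str.join "\n" ((a ++ "\n" ++ s) :: l) = PySem.Str.join "\n" (a :: s :: l) := by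
  rw [← String.toList_inj, PySem.Str.toList_join, PySem.Str.toList_join]
  cases l with
  | nil =>
    simp only [List.map_cons, List.map_nil, PySem.Chars.join_singleton,
      PySem.Chars.join_cons_cons]
    simp
  | cons b l' =>
    simp only [List.map_cons, PySem.Chars.join_cons_cons]
    simp

theorem pvFold_inv (zs : List ((Int × Int) × String)) (fuel : Nat) (hf : zs.length ≤ fuel)
    (ks : List (Int × Int)) (k : Int × Int) (as : List String) (a : String) :
    zs.foldl pvStep (ks ++ [k], as ++ [a]) =
      (ks ++ (pvRunsGo (fuel + 1) ((k, a) :: zs)).1, as ++ (pvRunsGo (fuel + 1) ((k, a) :: zs)).2) := by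
  induction zs generalizing fuel ks k as a with
  | nil => simp [pvRunsGo, pvJoin_singleton]
  | cons p rest ih =>
    obtain ⟨r, s⟩ := p
    rw [List.foldl_cons]
    by_cases h : r = k
    · subst h
      have hstep : pvStep (ks ++ [r], as ++ [a]) (r, s) = (ks ++ [r], as ++ [a ++ "\n" ++ s]) := by
        simp [pvStep, pvSetLast_append]
      have hrest : rest.length ≤ fuel := by
        simp only [List.length_cons] at hf; omega
      rw [hstep, ih fuel hrest]
      conv_rhs => rw [pvRunsGo]
      conv_lhs => rw [pvRunsGo]
      simp only [List.takeWhile_cons, List.dropWhile_cons, BEq.rfl, if_true, List.map_cons]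
      simp [pvJoin_shift]
    · have hkr : ¬ k = r := fun e => h e.symm
      have hstep : pvStep (ks ++ [k], as ++ [a]) (r, s) = ((ks ++ [k]) ++ [r], (as ++ [a]) ++ [s]) := by
        simp [pvStep, hkr]
      obtain ⟨f', rfl⟩ : ∃ f', fuel = f' + 1 := by
        cases fuel with
        | zero => simp at hf
        | succ f' => exact ⟨f', rfl⟩
      have hrest : rest.length ≤ f' := by
        simp only [List.length_cons] at hf; omega
      rw [hstep, ih f' hrest]
      have hb : ((r, s).1 == k) = false := by simpa using h
      conv_rhs => rw [pvRunsGo]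
      simp only [List.takeWhile_cons, List.dropWhile_cons, hb]
      simp [pvJoin_singleton]

theorem pvFold_range_eq_zip (ranges : List (Int × Int)) (code_strs : List String)
    (hle : code_strs.length ≤ ranges.length) :
    merge_same_ranges ranges code_strs = (ranges.zip code_strs).foldl pvStep ([], []) := by
  unfold merge_same_ranges
  have hlen : (ranges.zip code_strs).length = code_strs.length := by
    simp [List.length_zip]; omega
  have hcast : (code_strs.length : Int) = ((ranges.zip code_strs).length : Int) := by
    exact_mod_cast hlen.symm
  rw [hcast]
  rw [PySem.List.foldl_congr_mem (PySem.List.pyRange 0 ((ranges.zip code_strs).length : Int)) _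
    (fun (st : List (Int × Int) × List String) i =>
      pvStep st (PySem.List.pyGetD (ranges.zip code_strs) i ((0, 0), ""))) ([], [])
    (by
      intro acc i hi
      obtain ⟨h0, hlt⟩ := (PySem.List.mem_pyRange_one).1 hi
      obtain ⟨n, rfl⟩ := Int.eq_ofNat_of_zero_le h0
      have hn : n < (ranges.zip code_strs).length := by exact_mod_cast hlt
      have hz : PySem.List.pyGetD (ranges.zip code_strs) (n : Int) ((0, 0), "") = (ranges.zip code_strs)[n] := by
        rw [PySem.List.pyGetD_natCast]; exact List.getD_eq_getElem _ _ hn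
      have hnr : n < ranges.length := by omega
      have hns : n < code_strs.length := by omega
      have hr : PySem.List.pyGetD ranges (n : Int) (0, 0) = ranges[n] := by
        rw [PySem.List.pyGetD_natCast]; exact List.getD_eq_getElem _ _ hnr
      have hs : PySem.List.pyGetD code_strs (n : Int) "" = code_strs[n] := by
        rw [PySem.List.pyGetD_natCast]; exact List.getD_eq_getElem _ _ hns
      simp [pvStep, hz, hr, hs, List.getElem_zip])]
  exact PySem.List.foldl_pyRange_zero_pyGetD' (ranges.zip code_strs) ((0, 0), "") pvStep ([], [])

-- ===== VERDICT (by name: the statement is the Claim_ definition above) =====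
theorem merge_same_ranges_spec : Claim_equal_merge_same_ranges := by
  intro ranges code_strs _ hpre
  unfold Spec_merge_same_ranges merge_same_ranges_alt
  rw [pvFold_range_eq_zip ranges code_strs hpre]
  cases hz : ranges.zip code_strs with
  | nil => rfl
  | cons p rest =>
    obtain ⟨r, s⟩ := p
    rw [List.foldl_cons]
    have h1 : pvStep ([], []) (r, s) = ([] ++ [r], [] ++ [s]) := by simp [pvStep]
    rw [h1, pvFold_inv rest rest.length le_rfl]
    simp [List.length_cons]
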